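-- pv_equiv track=rewrite | github.com/coowdeen/pyLearn | week3-strings-graphics-style/hw3.py | patternedMessage
-- ===== SOURCE A (Python) =====
-- def msgNormalize(msg):
--     normMsg = ""
--     for s in msg:
--         if(s.isspace()):
--             continue
--         else:
--             normMsg += s
--     return normMsg
--
-- def patternedMessage(msg, pattern):
--     newS = ""
--     normMsg = msgNormalize(msg)# remove whitespace in the message
--     length = len(normMsg)
--     count = 0# marks the position of character in the normMsg
--     flag = -1# add "\n" at the end of each line of the output string if not 0
--
--     for line in pattern.splitlines():# get the number of lines of the pattern
--         if(line.isspace() or line == "" or line =="\n"):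
--             continue
--         else:
--             flag += 1
--
--     for line in pattern.splitlines():
--         for s in line:
--             if(s.isspace()):
--                 newS += " "
--             else:
--                 newS += normMsg[count]
--                 count += 1
--                 count %= length# keeping the count in string index range
--         if(flag != 0 and not line.isspace() and line != ""):
--             newS += "\n"
--             flag -= 1
--     return newS
-- ===== SOURCE B (Python) =====
-- def patternedMessage(msg, pattern):
--     norm = "".join(c for c in msg if not c.isspace())
--     lines = pattern.splitlines()
--     # index of the last non-blank line
--     last = -1
--     for i, line in enumerate(lines):
--         if line != "" and not line.isspace():
--             last = i
--     # stage 1: the skeleton — the pattern's structure with the newlines already placed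
--     skeleton = "".join(
--         line + ("\n" if (line != "" and not line.isspace() and i != last) else "")
--         for i, line in enumerate(lines))
--     # stage 2: the fill — the cycled message, built in bulk by string repetition
--     k = sum(1 for c in skeleton if not c.isspace())
--     fill = (norm * (k // len(norm) + 1))[:k] if k else ""
--     # stage 3: merge — pour the fill into the skeleton's non-space slots
--     it = iter(fill)
--     return "".join(c if c == "\n" else (" " if c.isspace() else next(it)) for c in skeleton)
-- ===== Notes on version B (the rewrite author's own statement) =====
-- stated objective: alternative
-- what changed: B replaces A's single character-by-character pass with its cycling counter and decrementing flag by three bulk stages: build the output skeleton (lines with separating newlines already placed via the last non-blank index), build the fill in one string-repetition-and-slice step, then pour the fill into the skeleton's non-space slots.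
import Mathlib
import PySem

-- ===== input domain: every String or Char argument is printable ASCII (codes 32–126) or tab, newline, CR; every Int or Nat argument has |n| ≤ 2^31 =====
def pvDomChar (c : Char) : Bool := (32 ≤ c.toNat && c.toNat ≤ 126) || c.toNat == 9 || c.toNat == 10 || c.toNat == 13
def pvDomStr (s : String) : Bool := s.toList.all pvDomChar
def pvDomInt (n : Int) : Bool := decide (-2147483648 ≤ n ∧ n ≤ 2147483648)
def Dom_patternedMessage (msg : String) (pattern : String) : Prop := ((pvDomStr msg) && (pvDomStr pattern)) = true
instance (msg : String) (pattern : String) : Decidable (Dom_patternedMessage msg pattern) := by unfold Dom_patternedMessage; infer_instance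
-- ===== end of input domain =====

-- B replaces A's one pass with a per-character cycling counter by three bulk stages: build the
-- output's skeleton (pattern lines with the newlines already placed), build the fill by string
-- repetition, then pour the fill into the skeleton's non-space slots (objective: alternative);
-- equivalence is about the return value on Pre_ (A raises IndexError outside it).

-- ===== PORT A =====
def pvNormA (msg : List Char) : List Char :=
  msg.foldl (fun normMsg s => if PySem.Chars.isspace s then normMsg else normMsg ++ [s]) []

def patternedMessage (msg : String) (pattern : String) : String :=
  let normMsg := pvNormA msg.toList
  let length : Int := normMsg.length
  let flag : Int := (PySem.Chars.splitlines pattern.toList).foldl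
    (fun flag line =>
      if PySem.Chars.strIsspace line || line == ([] : List Char) || line == ['\n'] then flag
      else flag + 1) (-1)
  let r : Option (List Char × Int × Int) := (PySem.Chars.splitlines pattern.toList).foldl
    (fun st line =>
      match st with
      | none => none
      | some (newS, count, flag) =>
        match line.foldl (fun st2 s =>
            match st2 with
            | none => none
            | some (newS, count) =>
              if PySem.Chars.isspace s then some (newS ++ [' '], count)
              else
                match PySem.List.pyGet? normMsg count with
                | none => none  -- IndexError on empty normalized message; excluded by Pre_
                | some c => some (newS ++ [c], PySem.Int.mod (count + 1) length))
          (some (newS, count)) with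
        | none => none
        | some (newS, count) =>
          if flag != 0 && !(PySem.Chars.strIsspace line) && line != ([] : List Char) then
            some (newS ++ ['\n'], count, flag - 1)
          else some (newS, count, flag))
    (some ([], 0, flag))
  match r with
  | none => ""  -- unreachable under Pre_ (Python raises there)
  | some (newS, _, _) => String.ofList newS

-- ===== PORT B =====
def patternedMessage_alt (msg : String) (pattern : String) : String :=
  let norm := msg.toList.filter (fun c => !PySem.Chars.isspace c)
  let lines := PySem.Chars.splitlines pattern.toList
  let last : Int := (PySem.List.enumerate lines 0).foldl
    (fun last il =>
      if il.2 != ([] : List Char) && !PySem.Chars.strIsspace il.2 then il.1 else last) (-1)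
  -- stage 1: the skeleton — the pattern's lines with the separating newlines already placed
  let skeleton : List Char := (PySem.List.enumerate lines 0).foldl
    (fun acc il =>
      acc ++ il.2 ++
        (if il.2 != ([] : List Char) && !PySem.Chars.strIsspace il.2 && il.1 != last
         then ['\n'] else [])) []
  -- stage 2: the fill — the cycled message, built in bulk by repetition and one slice
  let k : Int := skeleton.foldl (fun n c => if !PySem.Chars.isspace c then n + 1 else n) 0
  let fill? : Option (List Char) :=
    if k = 0 then some []
    else
      match PySem.Int.floordiv? k (norm.length : Int) with
      | none => none  -- ZeroDivisionError on empty normalized message; excluded by Pre_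
      | some q => some (PySem.List.slice (PySem.List.pyRepeat norm (q + 1)) none (some k))
  -- stage 3: merge — pour the fill into the skeleton's non-space slots
  match fill? with
  | none => ""  -- unreachable under Pre_ (Python raises there)
  | some fill =>
    match skeleton.foldl
        (fun st c =>
          match st with
          | none => none
          | some (out, it) =>
            if c == '\n' then some (out ++ [c], it)
            else if PySem.Chars.isspace c then some (out ++ [' '], it)
            else
              match it with
              | [] => none  -- exhausted iterator (never reached: fill has one char per slot)
              | x :: restIt => some (out ++ [x], restIt))
        (some (([] : List Char), fill)) with
    | none => ""
    | some (out, _) => String.ofList out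

-- ===== PRECONDITION & SPEC =====
-- Pre_ excludes exactly the inputs where Python A raises (IndexError): a message that is all
-- whitespace together with a pattern that has a non-blank line.
def Pre_patternedMessage (msg : String) (pattern : String) : Prop :=
  msg.toList.any (fun c => !PySem.Chars.isspace c) = true ∨
  (PySem.Chars.splitlines pattern.toList).all
    (fun l => l.isEmpty || PySem.Chars.strIsspace l) = true
instance (msg : String) (pattern : String) : Decidable (Pre_patternedMessage msg pattern) := by
  unfold Pre_patternedMessage; infer_instance

def pvWitness_patternedMessage : String × String := ("hello world", "** **\n\n  *\n*")

def Spec_patternedMessage (msg : String) (pattern : String) (out : String) : Prop := out = patternedMessage_alt msg pattern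
instance (msg : String) (pattern : String) (out : String) : Decidable (Spec_patternedMessage msg pattern out) := by unfold Spec_patternedMessage; infer_instance

-- ===== CLAIM (what is proved, stated in full; the proofs are below) =====
def Claim_equal_patternedMessage : Prop := ∀ (msg : String) (pattern : String), Dom_patternedMessage msg pattern → Pre_patternedMessage msg pattern → Spec_patternedMessage msg pattern (patternedMessage msg pattern)

-- ===== LEMMAS AND PROOFS =====

-- a line is blank iff it is empty or whitespace-only
def pvBlank (l : List Char) : Bool := l.isEmpty || PySem.Chars.strIsspace l
-- number of non-blank lines
def pvNB (ls : List (List Char)) : Nat := ls.countP (fun l => !pvBlank l)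
-- number of message-consuming (non-space) characters of a line
def pvNsp (l : List Char) : Nat := l.countP (fun c => !PySem.Chars.isspace c)

-- the rendering of one line, with raw running counter c
def pvRL (nm : List Char) : List Char → Int → List Char
  | [], _ => []
  | s :: rest, c =>
    if PySem.Chars.isspace s then ' ' :: pvRL nm rest c
    else PySem.List.pyGetD nm (PySem.Int.mod c nm.length) ' ' :: pvRL nm rest (c + 1)

-- the assembled output: rendered lines, '\n' after a non-blank line that is not the last non-blank
def pvAsm (nm : List Char) : List (List Char) → Int → List Char
  | [], _ => []
  | l :: rest, c =>
    pvRL nm l c ++ (if !pvBlank l && pvNB rest != 0 then ['\n'] else []) ++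
      pvAsm nm rest (c + pvNsp l)

-- B's stage-1 skeleton: the lines with '\n' after each non-blank line except the last non-blank
def pvSkel : List (List Char) → List Char
  | [] => []
  | l :: rest => l ++ (if !pvBlank l && pvNB rest != 0 then ['\n'] else []) ++ pvSkel rest

-- B's fill, characterised: the cycled message from global slot j, n slots long
def pvG (nm : List Char) (j n : Nat) : List Char :=
  (List.range' j n).map (fun t => nm.getD (t % nm.length) ' ')

-- what B's `last` must satisfy, suffix-locally
def pvHlast (last : Int) (s : Int) : List (List Char) → Prop
  | [] => True
  | l :: rest => (pvBlank l = false → (s ≠ last ↔ pvNB rest ≠ 0)) ∧ pvHlast last (s + 1) rest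

theorem pvNorm_eq (msg : List Char) :
    pvNormA msg = msg.filter (fun c => !PySem.Chars.isspace c) := by
  unfold pvNormA
  have h : (fun (normMsg : List Char) (s : Char) =>
        if PySem.Chars.isspace s then normMsg else normMsg ++ [s])
      = (fun (acc : List Char) (x : Char) =>
        if (!PySem.Chars.isspace x) = true then acc ++ [id x] else acc) := by
    funext acc s; cases h : PySem.Chars.isspace s <;> simp_all
  rw [h, PySem.List.foldl_append_if]
  simp

theorem pvCondA_eq (l : List Char) :
    (PySem.Chars.strIsspace l || l == ([] : List Char) || l == ['\n']) = pvBlank l := by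
  by_cases h : l = ['\n']
  · subst h; decide
  · simp [pvBlank, h, Bool.or_comm, List.isEmpty_iff]

theorem pvFlagInit (ls : List (List Char)) (t : Int) :
    ls.foldl (fun flag line =>
      if PySem.Chars.strIsspace line || line == ([] : List Char) || line == ['\n'] then flag
      else flag + 1) t = t + pvNB ls := by
  induction ls generalizing t with
  | nil => simp [pvNB]
  | cons l rest ih =>
    rw [List.foldl_cons]
    have hc := pvCondA_eq l
    cases hb : pvBlank l with
    | true => rw [hc, if_pos hb, ih]; simp [pvNB, hb]
    | false => rw [hc, if_neg (by simp [hb]), ih]; simp [pvNB, hb]; ring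

theorem pvModStep (L c : Int) (hL : 0 < L) :
    PySem.Int.mod (PySem.Int.mod c L + 1) L = PySem.Int.mod (c + 1) L := by
  rw [PySem.Int.mod_eq_emod_of_pos hL, PySem.Int.mod_eq_emod_of_pos hL,
    PySem.Int.mod_eq_emod_of_pos hL, Int.emod_add_emod]

theorem pvGetSome (nm : List Char) (c : Int) (h : nm ≠ []) :
    PySem.List.pyGet? nm (PySem.Int.mod c (nm.length : Int)) =
      some (PySem.List.pyGetD nm (PySem.Int.mod c (nm.length : Int)) ' ') := by
  have hL : 0 < (nm.length : Int) := by
    have := List.length_pos_iff.mpr h; exact_mod_cast this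
  have h0 := PySem.Int.mod_nonneg c hL
  have h1 := PySem.Int.mod_lt c hL
  rw [PySem.List.pyGetD_of_nonneg nm _ h0]
  simp only [PySem.List.pyGet?, PySem.List.pyIdx?, if_pos h0, if_pos h1, Option.bind_some]
  rw [List.getElem?_eq_getElem (by omega), List.getD_eq_getElem _ _ (by omega)]

theorem pvAinner (nm : List Char) (h : nm ≠ []) (line : List Char) :
    ∀ (s0 : List Char) (c a : Int), a = PySem.Int.mod c (nm.length : Int) →
    line.foldl (fun st2 s =>
        match st2 with
        | none => none
        | some (newS, count) =>
          if PySem.Chars.isspace s then some (newS ++ [' '], count)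
          else
            match PySem.List.pyGet? nm count with
            | none => none
            | some ch => some (newS ++ [ch], PySem.Int.mod (count + 1) (nm.length : Int)))
      (some (s0, a)) =
    some (s0 ++ pvRL nm line c, PySem.Int.mod (c + pvNsp line) (nm.length : Int)) := by
  have hL : 0 < (nm.length : Int) := by
    have := List.length_pos_iff.mpr h; exact_mod_cast this
  induction line with
  | nil => intro s0 c a ha; simp [pvRL, pvNsp, ha]
  | cons s rest ih =>
    intro s0 c a ha
    subst ha
    cases hs : PySem.Chars.isspace s with
    | true =>
      simp only [List.foldl_cons, hs]
      exact (ih (s0 ++ [' ']) c _ rfl).trans (by simp [pvRL, pvNsp, hs])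
    | false =>
      simp only [List.foldl_cons, hs]
      rw [pvGetSome nm c h]
      refine (ih (s0 ++ [PySem.List.pyGetD nm (PySem.Int.mod c (nm.length : Int)) ' ']) (c + 1)
        _ (pvModStep _ c hL)).trans ?_
      have harg : c + 1 + (pvNsp rest : Int) = c + (pvNsp (s :: rest) : Int) := by
        simp [pvNsp, hs]; ring
      rw [harg]
      simp [pvRL, hs]

theorem pvAouter (nm : List Char) (h : nm ≠ []) (ls : List (List Char)) :
    ∀ (s0 : List Char) (c a f : Int), a = PySem.Int.mod c (nm.length : Int) →
    (pvNB ls ≠ 0 → f = (pvNB ls : Int) - 1) →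
    ∃ p : Int × Int,
    ls.foldl (fun st line =>
      match st with
      | none => none
      | some (newS, count, flag) =>
        match line.foldl (fun st2 s =>
            match st2 with
            | none => none
            | some (newS, count) =>
              if PySem.Chars.isspace s then some (newS ++ [' '], count)
              else
                match PySem.List.pyGet? nm count with
                | none => none
                | some ch => some (newS ++ [ch], PySem.Int.mod (count + 1) (nm.length : Int)))
          (some (newS, count)) with
        | none => none
        | some (newS, count) =>
          if flag != 0 && !(PySem.Chars.strIsspace line) && line != ([] : List Char) then
            some (newS ++ ['\n'], count, flag - 1)
          else some (newS, count, flag))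
      (some (s0, a, f)) =
    some (s0 ++ pvAsm nm ls c, p) := by
  induction ls with
  | nil => intro s0 c a f ha hf; exact ⟨(a, f), by simp [pvAsm]⟩
  | cons l rest ih =>
    intro s0 c a f ha hf
    rw [List.foldl_cons]
    have hstep := pvAinner nm h l s0 c a ha
    cases hb : pvBlank l with
    | true =>
      have hcond : (f != 0 && !(PySem.Chars.strIsspace l) && l != ([] : List Char)) = false := by
        rcases Bool.or_eq_true_iff.mp hb with h1 | h1
        · simp [List.isEmpty_iff.mp h1]
        · simp [h1]
      have hnb : pvNB (l :: rest) = pvNB rest := by simp [pvNB, hb]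
      obtain ⟨p, hp⟩ := ih (s0 ++ pvRL nm l c) (c + pvNsp l) _ f rfl (by rw [← hnb]; exact hf)
      refine ⟨p, ?_⟩
      refine Eq.trans ?_ (hp.trans ?_)
      · congr 1
        dsimp only
        rw [hstep, hcond]
        simp
      · simp [pvAsm, hb]
    | false =>
      have hnb : pvNB (l :: rest) = pvNB rest + 1 := by simp [pvNB, hb]
      have hf' : f = (pvNB rest : Int) := by
        have := hf (by omega); rw [hnb] at this; push_cast at this; omega
      have hem : l.isEmpty = false := by
        rcases Bool.or_eq_false_iff.mp hb with ⟨h1, _⟩; exact h1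
      have hsp : PySem.Chars.strIsspace l = false := by
        rcases Bool.or_eq_false_iff.mp hb with ⟨_, h2⟩; exact h2
      by_cases hr : pvNB rest = 0
      · have hf0 : f = 0 := by rw [hf', hr]; rfl
        have hcond : (f != 0 && !(PySem.Chars.strIsspace l) && l != ([] : List Char)) = false := by
          simp [hf0]
        obtain ⟨p, hp⟩ := ih (s0 ++ pvRL nm l c) (c + pvNsp l) _ f rfl (by intro hc; exact absurd hr hc)
        refine ⟨p, ?_⟩
        refine Eq.trans ?_ (hp.trans ?_)
        · congr 1; dsimp only; rw [hstep, hcond]; simp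
        · simp [pvAsm, hb, hr]
      · have hcond : (f != 0 && !(PySem.Chars.strIsspace l) && l != ([] : List Char)) = true := by
          have h1 : f ≠ 0 := by rw [hf']; exact_mod_cast hr
          have h2 : l ≠ [] := by cases l <;> simp_all
          simp [h1, h2, hsp]
        obtain ⟨p, hp⟩ := ih (s0 ++ pvRL nm l c ++ ['\n']) (c + pvNsp l) _ (f - 1) rfl
          (by intro _; rw [hf'])
        refine ⟨p, ?_⟩
        refine Eq.trans ?_ (hp.trans ?_)
        · congr 1; dsimp only; rw [hstep, hcond]; simp
        · simp [pvAsm, hb, hr]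

theorem pvLastLB (ls : List (List Char)) :
    ∀ (s t : Int), t < s →
    (pvNB ls = 0 → (PySem.List.enumerate ls s).foldl (fun last il =>
        if il.2 != ([] : List Char) && !PySem.Chars.strIsspace il.2 then il.1 else last) t = t) ∧
    (pvNB ls ≠ 0 → s ≤ (PySem.List.enumerate ls s).foldl (fun last il =>
        if il.2 != ([] : List Char) && !PySem.Chars.strIsspace il.2 then il.1 else last) t) := by
  induction ls with
  | nil =>
    intro s t ht
    exact ⟨fun _ => by simp [PySem.List.enumerate], fun hn => absurd rfl hn⟩
  | cons l rest ih =>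
    intro s t ht
    rw [PySem.List.enumerate_cons, List.foldl_cons]
    cases hb : pvBlank l with
    | true =>
      have hcond : (l != ([] : List Char) && !PySem.Chars.strIsspace l) = false := by
        rcases Bool.or_eq_true_iff.mp hb with h1 | h1
        · simp [List.isEmpty_iff.mp h1]
        · simp [h1]
      have hnb : pvNB (l :: rest) = pvNB rest := by simp [pvNB, hb]
      simp only [hcond, Bool.false_eq_true, if_false]
      constructor
      · intro h0; rw [hnb] at h0; exact (ih (s + 1) t (by omega)).1 h0
      · intro h0; rw [hnb] at h0
        have := (ih (s + 1) t (by omega)).2 h0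
        omega
    | false =>
      have hem : l.isEmpty = false := (Bool.or_eq_false_iff.mp hb).1
      have hsp : PySem.Chars.strIsspace l = false := (Bool.or_eq_false_iff.mp hb).2
      have h2 : l ≠ [] := by cases l <;> simp_all
      have hcond : (l != ([] : List Char) && !PySem.Chars.strIsspace l) = true := by
        simp [h2, hsp]
      have hnb : pvNB (l :: rest) ≠ 0 := by simp [pvNB, hb]
      simp only [hcond, if_true]
      constructor
      · intro h0; exact absurd h0 hnb
      · intro _
        by_cases hr : pvNB rest = 0
        · have := (ih (s + 1) s (by omega)).1 hr
          omega
        · have := (ih (s + 1) s (by omega)).2 hr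
          omega

theorem pvHlastOf (ls : List (List Char)) :
    ∀ (s t : Int), t < s →
    pvHlast ((PySem.List.enumerate ls s).foldl (fun last il =>
        if il.2 != ([] : List Char) && !PySem.Chars.strIsspace il.2 then il.1 else last) t) s ls := by
  induction ls with
  | nil => intro s t ht; trivial
  | cons l rest ih =>
    intro s t ht
    rw [PySem.List.enumerate_cons, List.foldl_cons]
    cases hb : pvBlank l with
    | true =>
      have hcond : (l != ([] : List Char) && !PySem.Chars.strIsspace l) = false := by
        rcases Bool.or_eq_true_iff.mp hb with h1 | h1
        · simp [List.isEmpty_iff.mp h1]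
        · simp [h1]
      simp only [hcond, Bool.false_eq_true, if_false]
      exact ⟨fun hf => absurd hb (by simp [hf]), ih (s + 1) t (by omega)⟩
    | false =>
      have hem : l.isEmpty = false := (Bool.or_eq_false_iff.mp hb).1
      have hsp : PySem.Chars.strIsspace l = false := (Bool.or_eq_false_iff.mp hb).2
      have h2 : l ≠ [] := by cases l <;> simp_all
      have hcond : (l != ([] : List Char) && !PySem.Chars.strIsspace l) = true := by
        simp [h2, hsp]
      simp only [hcond, if_true]
      refine ⟨fun _ => ⟨?_, ?_⟩, ih (s + 1) s (by omega)⟩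
      · intro hne hr
        have := (pvLastLB rest (s + 1) s (by omega)).1 hr
        exact hne this.symm
      · intro hr
        have := (pvLastLB rest (s + 1) s (by omega)).2 hr
        omega

theorem pvBlank_all {l : List Char} (hb : pvBlank l = true) :
    ∀ x ∈ l, PySem.Chars.isspace x = true := by
  rcases Bool.or_eq_true_iff.mp hb with h | h
  · simp [List.isEmpty_iff.mp h]
  · simp only [PySem.Chars.strIsspace, Bool.and_eq_true] at h
    exact fun x hx => List.all_eq_true.mp h.2 x hx

theorem pvAinner0 (nm : List Char) (line : List Char)
    (hsp : ∀ x ∈ line, PySem.Chars.isspace x = true) :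
    ∀ (s0 : List Char) (count : Int),
    line.foldl (fun st2 s =>
        match st2 with
        | none => none
        | some (newS, count) =>
          if PySem.Chars.isspace s then some (newS ++ [' '], count)
          else
            match PySem.List.pyGet? nm count with
            | none => none
            | some ch => some (newS ++ [ch], PySem.Int.mod (count + 1) (nm.length : Int)))
      (some (s0, count)) =
    some (s0 ++ line.map (fun _ => ' '), count) := by
  induction line with
  | nil => intro s0 count; simp
  | cons s rest ih =>
    intro s0 count
    have hs : PySem.Chars.isspace s = true := hsp s (by simp)
    simp only [List.foldl_cons, hs]
    exact (ih (fun x hx => hsp x (by simp [hx])) (s0 ++ [' ']) count).trans (by simp)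

theorem pvAouter0 (nm : List Char) (ls : List (List Char))
    (hbl : ∀ l ∈ ls, pvBlank l = true) :
    ∀ (s0 : List Char) (a f : Int),
    ls.foldl (fun st line =>
      match st with
      | none => none
      | some (newS, count, flag) =>
        match line.foldl (fun st2 s =>
            match st2 with
            | none => none
            | some (newS, count) =>
              if PySem.Chars.isspace s then some (newS ++ [' '], count)
              else
                match PySem.List.pyGet? nm count with
                | none => none
                | some ch => some (newS ++ [ch], PySem.Int.mod (count + 1) (nm.length : Int)))
          (some (newS, count)) with
        | none => none
        | some (newS, count) =>
          if flag != 0 && !(PySem.Chars.strIsspace line) && line != ([] : List Char) then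
            some (newS ++ ['\n'], count, flag - 1)
          else some (newS, count, flag))
      (some (s0, a, f)) =
    some (s0 ++ (ls.map (fun l => l.map (fun _ => ' '))).flatten, a, f) := by
  induction ls with
  | nil => intro s0 a f; simp
  | cons l rest ih =>
    intro s0 a f
    have hb : pvBlank l = true := hbl l (by simp)
    have hcond : (f != 0 && !(PySem.Chars.strIsspace l) && l != ([] : List Char)) = false := by
      rcases Bool.or_eq_true_iff.mp hb with h1 | h1
      · simp [List.isEmpty_iff.mp h1]
      · simp [h1]
    rw [List.foldl_cons]
    refine Eq.trans ?_ ((ih (fun x hx => hbl x (by simp [hx])) (s0 ++ l.map (fun _ => ' ')) a f).trans ?_)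
    · congr 1
      dsimp only
      rw [pvAinner0 nm l (pvBlank_all hb) s0 a, hcond]
      simp
    · simp

-- every character of every line of splitlines avoids the break predicate
theorem pvGoMem (isB : Char → Bool) (s cur : List Char) (acc : List (List Char))
    (hcur : ∀ c ∈ cur, isB c = false)
    (hacc : ∀ l ∈ acc, ∀ c ∈ l, isB c = false) :
    ∀ l ∈ PySem.Chars.splitlines.go isB s cur acc, ∀ c ∈ l, isB c = false := by
  fun_induction PySem.Chars.splitlines.go isB s cur acc with
  | case1 cur acc h =>
    intro l hl c hc
    exact hacc l (by simpa using hl) c hc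
  | case2 cur acc h =>
    intro l hl c hc
    simp only [List.mem_reverse, List.mem_cons] at hl
    rcases hl with h' | h'
    · subst h'; exact hcur c (by simpa using hc)
    · exact hacc l h' c hc
  | case3 rest cur acc ih =>
    exact ih (by simp) (by
      intro l hl
      rcases List.mem_cons.mp hl with h | h
      · subst h; intro c hc; exact hcur c (by simpa using hc)
      · exact hacc l h)
  | case4 c rest cur acc hne hB ih =>
    exact ih (by simp) (by
      intro l hl
      rcases List.mem_cons.mp hl with h | h
      · subst h; intro c hc; exact hcur c (by simpa using hc)
      · exact hacc l h)
  | case5 c rest cur acc hne hB ih =>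
    refine ih ?_ hacc
    intro c' hc'
    rcases List.mem_cons.mp hc' with h | h
    · subst h; simpa using hB
    · exact hcur c' h

theorem pvNoNL (s : List Char) :
    ∀ l ∈ PySem.Chars.splitlines s, ∀ c ∈ l, c ≠ '\n' := by
  intro l hl c hc
  have := pvGoMem (fun c =>
      let n := c.toNat
      decide (n = 10) || decide (n = 13) || decide (n = 11) || decide (n = 12) ||
        decide (n = 28) || decide (n = 29) || decide (n = 30) || decide (n = 133) ||
        decide (n = 8232) || decide (n = 8233)) s [] []
    (by intro c hc; cases hc) (by intro l hl; cases hl) l hl c hc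
  intro hEq
  subst hEq
  simp at this

-- B's skeleton fold yields pvSkel when `last` satisfies pvHlast
theorem pvSkelOf (last : Int) (ls : List (List Char)) :
    ∀ (s : Int) (acc : List Char), pvHlast last s ls →
    (PySem.List.enumerate ls s).foldl
      (fun acc il =>
        acc ++ il.2 ++
          (if il.2 != ([] : List Char) && !PySem.Chars.strIsspace il.2 && il.1 != last
           then ['\n'] else [])) acc = acc ++ pvSkel ls := by
  induction ls with
  | nil => intro s acc _; simp [pvSkel]
  | cons l rest ih =>
    intro s acc hl
    obtain ⟨h1, h2⟩ := hl
    rw [PySem.List.enumerate_cons, List.foldl_cons]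
    cases hb : pvBlank l with
    | true =>
      have hcond : (l != ([] : List Char) && !PySem.Chars.strIsspace l && s != last) = false := by
        rcases Bool.or_eq_true_iff.mp hb with hx | hx
        · simp [List.isEmpty_iff.mp hx]
        · simp [hx]
      dsimp only
      simp only [hcond, Bool.false_eq_true, if_false]
      rw [ih (s + 1) (acc ++ l ++ []) h2]
      simp [pvSkel, hb]
    | false =>
      have hsp : PySem.Chars.strIsspace l = false := (Bool.or_eq_false_iff.mp hb).2
      have hne0 : l ≠ [] := by
        have hem : l.isEmpty = false := (Bool.or_eq_false_iff.mp hb).1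
        cases l <;> simp_all
      have hiff := h1 hb
      by_cases hr : pvNB rest = 0
      · have hs : s = last := by by_contra hne; exact (hiff.mp hne) hr
        have hcond : (l != ([] : List Char) && !PySem.Chars.strIsspace l && s != last) = false := by
          simp [hs]
        dsimp only
        simp only [hcond, Bool.false_eq_true, if_false]
        rw [ih (s + 1) (acc ++ l ++ []) h2]
        simp [pvSkel, hb, hr]
      · have hne : s ≠ last := hiff.mpr hr
        have hcond : (l != ([] : List Char) && !PySem.Chars.strIsspace l && s != last) = true := by
          simp [hne0, hsp, hne]
        dsimp only
        simp only [hcond, if_true]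
        rw [ih (s + 1) (acc ++ l ++ ['\n']) h2]
        simp [pvSkel, hb, hr]

-- blank lines contribute no separators: the skeleton of an all-blank pattern is its flattening
theorem pvSkelBlank (ls : List (List Char)) (hbl : ∀ l ∈ ls, pvBlank l = true) :
    pvSkel ls = ls.flatten := by
  induction ls with
  | nil => rfl
  | cons l rest ih =>
    have hb : pvBlank l = true := hbl l (by simp)
    simp [pvSkel, hb, ih (fun x hx => hbl x (by simp [hx]))]

-- the skeleton has exactly one non-space slot per non-space pattern character
theorem pvNspSkel (ls : List (List Char)) :
    (pvSkel ls).countP (fun c => !PySem.Chars.isspace c) = (ls.map pvNsp).sum := by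
  induction ls with
  | nil => rfl
  | cons l rest ih =>
    have hnl : (['\n'] : List Char).countP (fun c => !PySem.Chars.isspace c) = 0 := by decide
    simp only [pvSkel, List.countP_append, List.map_cons, List.sum_cons, ih]
    split
    · rw [hnl]; simp [pvNsp]
    · simp [pvNsp]

theorem pvGcons (nm : List Char) (j n : Nat) :
    pvG nm j (n + 1) = nm.getD (j % nm.length) ' ' :: pvG nm (j + 1) n := by
  simp [pvG, List.range'_succ]

-- the flattened repetition is the cycled message
theorem pvRepeatG (nm : List Char) (m : Nat) :
    (List.replicate m nm).flatten = pvG nm 0 (m * nm.length) := by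
  induction m with
  | zero => simp [pvG]
  | succ m ih =>
    rw [List.replicate_succ', List.flatten_append, ih]
    have hsplit : pvG nm 0 ((m + 1) * nm.length) =
        pvG nm 0 (m * nm.length) ++ pvG nm (m * nm.length) nm.length := by
      unfold pvG
      rw [← List.map_append]
      congr 1
      have := @List.range'_append 0 (m * nm.length) nm.length 1
      simpa [Nat.succ_mul] using this.symm
    rw [hsplit]
    congr 1
    unfold pvG
    rw [List.range'_eq_map_range, List.map_map]
    apply List.ext_getElem (by simp)
    intro i h1 h2
    simp only [List.getElem_map, List.getElem_range, Function.comp_apply]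
    have hi : i < nm.length := by simpa using h1
    rw [Nat.add_comm, Nat.add_mul_mod_self_right, Nat.mod_eq_of_lt hi,
      List.getD_eq_getElem _ _ hi]
    simp

-- a prefix of the cycled message is the cycled message
theorem pvGtake (nm : List Char) (K N : Nat) (h : K ≤ N) :
    (pvG nm 0 N).take K = pvG nm 0 K := by
  have hsplit : pvG nm 0 N = pvG nm 0 K ++ pvG nm K (N - K) := by
    unfold pvG
    rw [← List.map_append]
    congr 1
    have h2 : List.range' 0 K ++ List.range' K (N - K) = List.range' 0 (K + (N - K)) := by
      simpa using @List.range'_append 0 K (N - K) 1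
    rw [show N = K + (N - K) from by omega, ← h2]
    congr 2
    omega
  rw [hsplit, List.take_left' (by simp [pvG])]

-- B's merge over one (newline-free) line renders it like pvRL, consuming pvNsp slots of the fill
theorem pvMergeLine (nm : List Char) (line : List Char) (hnl : ∀ c ∈ line, c ≠ '\n') :
    ∀ (j n : Nat) (out : List Char), pvNsp line ≤ n →
    line.foldl
        (fun st c =>
          match st with
          | none => none
          | some (out, it) =>
            if c == '\n' then some (out ++ [c], it)
            else if PySem.Chars.isspace c then some (out ++ [' '], it)
            else
              match it with
              | [] => none
              | x :: restIt => some (out ++ [x], restIt))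
        (some (out, pvG nm j n)) =
    some (out ++ pvRL nm line (j : Int), pvG nm (j + pvNsp line) (n - pvNsp line)) := by
  induction line with
  | nil => intro j n out _; simp [pvRL, pvNsp]
  | cons c rest ih =>
    intro j n out hle
    have hcn : (c == '\n') = false := by
      simpa using hnl c (by simp)
    have hnl' : ∀ x ∈ rest, x ≠ '\n' := fun x hx => hnl x (by simp [hx])
    cases hs : PySem.Chars.isspace c with
    | true =>
      have hnsp : pvNsp (c :: rest) = pvNsp rest := by simp [pvNsp, hs]
      rw [hnsp] at hle
      simp only [List.foldl_cons, hcn, Bool.false_eq_true, if_false, hs, if_true]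
      rw [ih hnl' j n (out ++ [' ']) hle]
      simp [pvRL, hs, hnsp]
    | false =>
      have hnsp : pvNsp (c :: rest) = pvNsp rest + 1 := by simp [pvNsp, hs]
      rw [hnsp] at hle
      obtain ⟨n', rfl⟩ : ∃ n', n = n' + 1 := ⟨n - 1, by omega⟩
      rw [pvGcons]
      simp only [List.foldl_cons, hcn, Bool.false_eq_true, if_false, hs]
      rw [ih hnl' (j + 1) n' (out ++ [nm.getD (j % nm.length) ' ']) (by omega)]
      have hhd : PySem.List.pyGetD nm (PySem.Int.mod (j : Int) (nm.length : Int)) ' '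
          = nm.getD (j % nm.length) ' ' := by
        rw [PySem.Int.mod_natCast]
        exact PySem.List.pyGetD_natCast nm _ ' '
      have hstep : ((j : Int) + 1) = ((j + 1 : Nat) : Int) := by push_cast; ring
      simp only [pvRL, hs, Bool.false_eq_true, if_false, hhd, hstep, hnsp]
      refine congrArg some (Prod.ext (by simp) ?_)
      show pvG nm (j + 1 + pvNsp rest) (n' - pvNsp rest)
          = pvG nm (j + (pvNsp rest + 1)) (n' + 1 - (pvNsp rest + 1))
      congr 1 <;> omega

-- B's merge over the whole skeleton assembles pvAsm
theorem pvMergeAll (nm : List Char) (ls : List (List Char))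
    (hnl : ∀ l ∈ ls, ∀ c ∈ l, c ≠ '\n') :
    ∀ (j n : Nat) (out : List Char), (ls.map pvNsp).sum ≤ n →
    (pvSkel ls).foldl
        (fun st c =>
          match st with
          | none => none
          | some (out, it) =>
            if c == '\n' then some (out ++ [c], it)
            else if PySem.Chars.isspace c then some (out ++ [' '], it)
            else
              match it with
              | [] => none
              | x :: restIt => some (out ++ [x], restIt))
        (some (out, pvG nm j n)) =
    some (out ++ pvAsm nm ls (j : Int),
      pvG nm (j + (ls.map pvNsp).sum) (n - (ls.map pvNsp).sum)) := by
  induction ls with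
  | nil => intro j n out _; simp [pvSkel, pvAsm]
  | cons l rest ih =>
    intro j n out hle
    simp only [List.map_cons, List.sum_cons] at hle ⊢
    have hlel : pvNsp l ≤ n := by omega
    rw [show pvSkel (l :: rest)
        = l ++ ((if !pvBlank l && pvNB rest != 0 then ['\n'] else []) ++ pvSkel rest) from by
      simp [pvSkel]]
    rw [List.foldl_append, pvMergeLine nm l (hnl l (by simp)) j n out hlel]
    have hrest : ∀ l' ∈ rest, ∀ c ∈ l', c ≠ '\n' := fun l' hl' => hnl l' (by simp [hl'])
    split
    · rw [List.foldl_append]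
      have hstep : (['\n'] : List Char).foldl
          (fun st c =>
            match st with
            | none => none
            | some (out, it) =>
              if c == '\n' then some (out ++ [c], it)
              else if PySem.Chars.isspace c then some (out ++ [' '], it)
              else
                match it with
                | [] => none
                | x :: restIt => some (out ++ [x], restIt))
          (some (out ++ pvRL nm l (j : Int), pvG nm (j + pvNsp l) (n - pvNsp l)))
        = some (out ++ pvRL nm l (j : Int) ++ ['\n'], pvG nm (j + pvNsp l) (n - pvNsp l)) := by
        simp
      rw [hstep, ih hrest (j + pvNsp l) (n - pvNsp l) _ (by omega)]
      refine congrArg some (Prod.ext ?_ ?_)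
      · show out ++ pvRL nm l (j:Int) ++ ['\n'] ++ pvAsm nm rest ((j + pvNsp l : Nat) : Int)
            = out ++ pvAsm nm (l :: rest) (j : Int)
        simp only [pvAsm]
        rename_i hcnd
        rw [if_pos hcnd]
        push_cast
        simp [List.append_assoc]
      · show pvG nm (j + pvNsp l + (rest.map pvNsp).sum) (n - pvNsp l - (rest.map pvNsp).sum)
            = pvG nm (j + (pvNsp l + (rest.map pvNsp).sum)) (n - (pvNsp l + (rest.map pvNsp).sum))
        congr 1 <;> omega
    · rw [List.nil_append, ih hrest (j + pvNsp l) (n - pvNsp l) _ (by omega)]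
      refine congrArg some (Prod.ext ?_ ?_)
      · show out ++ pvRL nm l (j:Int) ++ pvAsm nm rest ((j + pvNsp l : Nat) : Int)
            = out ++ pvAsm nm (l :: rest) (j : Int)
        simp only [pvAsm]
        rename_i hcnd
        rw [if_neg hcnd]
        push_cast
        simp [List.append_assoc]
      · show pvG nm (j + pvNsp l + (rest.map pvNsp).sum) (n - pvNsp l - (rest.map pvNsp).sum)
            = pvG nm (j + (pvNsp l + (rest.map pvNsp).sum)) (n - (pvNsp l + (rest.map pvNsp).sum))
        congr 1 <;> omega

-- B's merge over an all-whitespace, newline-free string blanks it out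
theorem pvMergeBlank (s : List Char) (hsp : ∀ c ∈ s, PySem.Chars.isspace c = true)
    (hnl : ∀ c ∈ s, c ≠ '\n') :
    ∀ (out it : List Char),
    s.foldl
        (fun st c =>
          match st with
          | none => none
          | some (out, it) =>
            if c == '\n' then some (out ++ [c], it)
            else if PySem.Chars.isspace c then some (out ++ [' '], it)
            else
              match it with
              | [] => none
              | x :: restIt => some (out ++ [x], restIt))
        (some (out, it)) =
    some (out ++ s.map (fun _ => ' '), it) := by
  induction s with
  | nil => intro out it; simp
  | cons c rest ih =>
    intro out it
    have hcn : (c == '\n') = false := by simpa using hnl c (by simp)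
    have hs : PySem.Chars.isspace c = true := hsp c (by simp)
    simp only [List.foldl_cons, hcn, Bool.false_eq_true, if_false, hs, if_true]
    rw [ih (fun x hx => hsp x (by simp [hx])) (fun x hx => hnl x (by simp [hx])) (out ++ [' ']) it]
    simp

-- ===== VERDICT (by name: the statement is the Claim_ definition above) =====
theorem patternedMessage_spec : Claim_equal_patternedMessage := by
  unfold Claim_equal_patternedMessage
  intro msg pattern _ hpre
  unfold Spec_patternedMessage patternedMessage patternedMessage_alt
  rw [pvNorm_eq]
  dsimp only
  rw [pvFlagInit (PySem.Chars.splitlines pattern.toList) (-1)]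
  rw [pvSkelOf _ (PySem.Chars.splitlines pattern.toList) 0 []
    (pvHlastOf (PySem.Chars.splitlines pattern.toList) 0 (-1) (by omega))]
  rw [List.nil_append, PySem.List.foldl_count_if, pvNspSkel]
  set nm := msg.toList.filter (fun c => !PySem.Chars.isspace c) with hnm
  set ls := PySem.Chars.splitlines pattern.toList with hls
  set K : Nat := (ls.map pvNsp).sum with hK
  have hnlls : ∀ l ∈ ls, ∀ c ∈ l, c ≠ '\n' := pvNoNL pattern.toList
  by_cases hnil : nm = []
  · -- all-whitespace message: by Pre_, every line of the pattern is blank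
    have hAll : ∀ l ∈ ls, pvBlank l = true := by
      rcases hpre with h | h
      · exfalso
        obtain ⟨c, hc, hcs⟩ := List.any_eq_true.mp h
        have : c ∈ msg.toList.filter (fun c => !PySem.Chars.isspace c) :=
          List.mem_filter.mpr ⟨hc, hcs⟩
        rw [← hnm, hnil] at this
        exact List.not_mem_nil this
      · exact fun l hl => List.all_eq_true.mp h l hl
    have hK0 : K = 0 := by
      rw [hK]
      apply List.sum_eq_zero
      intro x hx
      obtain ⟨l, hl, rfl⟩ := List.mem_map.mp hx
      exact List.countP_eq_zero.mpr (by
        intro c hc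
        simp [pvBlank_all (hAll l hl) c hc])
    rw [hnil, pvAouter0 _ _ hAll]
    dsimp only
    rw [hK0]
    rw [if_pos (by norm_num)]
    dsimp only
    have hflat := pvSkelBlank ls hAll
    have hallsp : ∀ c ∈ pvSkel ls, PySem.Chars.isspace c = true := by
      rw [hflat]
      intro c hc
      obtain ⟨l, hl, hcl⟩ := List.mem_flatten.mp hc
      exact pvBlank_all (hAll l hl) c hcl
    have hallnl : ∀ c ∈ pvSkel ls, c ≠ '\n' := by
      rw [hflat]
      intro c hc
      obtain ⟨l, hl, hcl⟩ := List.mem_flatten.mp hc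
      exact hnlls l hl c hcl
    rw [pvMergeBlank (pvSkel ls) hallsp hallnl [] []]
    dsimp only
    rw [List.nil_append]
    rw [hflat, List.map_flatten]
    refine congrArg String.ofList (congrArg List.flatten (List.map_congr_left ?_))
    intro l _
    simp
  · -- non-empty normalized message
    have hL0 : nm.length ≠ 0 := by simpa using hnil
    obtain ⟨p, hp⟩ := pvAouter _ hnil ls [] 0 0
      (-1 + (pvNB ls : Int))
      (by rw [PySem.Int.mod]; exact (Int.zero_fmod _).symm)
      (fun _ => by ring)
    rw [hp]
    dsimp only
    have hfill : (if (0 + (K : Int)) = 0 then some ([] : List Char)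
        else
          match PySem.Int.floordiv? (0 + (K : Int)) (nm.length : Int) with
          | none => none
          | some q => some (PySem.List.slice (PySem.List.pyRepeat nm (q + 1)) none
              (some (0 + (K : Int)))))
        = some (pvG nm 0 K) := by
      rw [Int.zero_add]
      by_cases hK0 : K = 0
      · rw [if_pos (by exact_mod_cast hK0), hK0]
        simp [pvG]
      · rw [if_neg (by exact_mod_cast hK0)]
        have hdiv : PySem.Int.floordiv? (K : Int) (nm.length : Int)
            = some ((K / nm.length : Nat) : Int) := by
          unfold PySem.Int.floordiv?
          rw [if_neg (by exact_mod_cast hL0)]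
          congr 1
          exact_mod_cast PySem.Int.floordiv_natCast K nm.length
        rw [hdiv]
        dsimp only
        congr 1
        have hq1 : ((K / nm.length : Nat) : Int) + 1 = ((K / nm.length + 1 : Nat) : Int) := by
          push_cast; ring
        rw [hq1]
        unfold PySem.List.pyRepeat
        rw [PySem.List.slice_to _ (Int.natCast_nonneg K), Int.toNat_natCast, Int.toNat_natCast,
          pvRepeatG, pvGtake]
        calc K ≤ K + 1 := by omega
          _ ≤ (K / nm.length + 1) * nm.length := by
            have h1 : 0 < nm.length := Nat.pos_of_ne_zero hL0
            have h2 : K % nm.length < nm.length := Nat.mod_lt _ h1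
            have h3 : nm.length * (K / nm.length) + K % nm.length = K := Nat.div_add_mod K _
            nlinarith
    rw [hfill]
    dsimp only
    rw [pvMergeAll nm ls hnlls 0 K [] (le_of_eq hK.symm)]
    dsimp only
    rw [List.nil_append]
    norm_num
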